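-- pv_equiv track=rewrite | github.com/CartwheelX/Res_sys | app.py | categorize_slots
-- ===== SOURCE A (Python) =====
-- def categorize_slots(slots):
--     """
--     Organize the slots into a nested dictionary:
--     {
--         'YYYY-MM-DD': {
--             'morning': {slot_string: reserved_by, ...},
--             'afternoon': {slot_string: reserved_by, ...}
--         },
--         ...
--     }
--     """
--     categorized = {}
--     for slot, reserved_by in slots.items():
--         try:
--             # Expects slot in the format: "YYYY-MM-DD HH:MM - HH:MM"
--             date, time_range = slot.split(" ", 1)
--             start_time = time_range.split(" - ")[0]
--             hour = int(start_time.split(":")[0])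
--         except Exception as e:
--             # Skip or handle unexpected slot formats
--             continue
--
--         if date not in categorized:
--             categorized[date] = {"morning": {}, "afternoon": {}}
--         # Morning period: 9:00 to 13:00
--         if 9 <= hour < 13:
--             categorized[date]["morning"][slot] = reserved_by
--         # Afternoon period: 15:00 to 18:00
--         elif 15 <= hour < 18:
--             categorized[date]["afternoon"][slot] = reserved_by
--     return categorized
-- ===== SOURCE B (Python) =====
-- def categorize_slots(slots):
--     # One grouping pass into date buckets, then one pass laying out morning/afternoon per date.
--     grouped = {}
--     for slot, reserved_by in slots.items():
--         try:
--             date, time_range = slot.split(" ", 1)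
--             hour = int(time_range.split(" - ")[0].split(":")[0])
--         except Exception:
--             continue
--         grouped.setdefault(date, []).append((slot, reserved_by, hour))
--     categorized = {}
--     for date, entries in grouped.items():
--         morning, afternoon = {}, {}
--         for slot, reserved_by, hour in entries:
--             if 9 <= hour < 13:
--                 morning[slot] = reserved_by
--             elif 15 <= hour < 18:
--                 afternoon[slot] = reserved_by
--         categorized[date] = {"morning": morning, "afternoon": afternoon}
--     return categorized
-- ===== Notes on version B (the rewrite author's own statement) =====
-- stated objective: alternative
-- what changed: Replaces A's single pass that creates and mutates the nested date->period->slot dict in place with a two-phase decomposition: first group parsed slots into per-date buckets of (slot, reserved_by, hour) triples, then lay each bucket out into its morning/afternoon dicts in a second pass.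
import Mathlib
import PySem

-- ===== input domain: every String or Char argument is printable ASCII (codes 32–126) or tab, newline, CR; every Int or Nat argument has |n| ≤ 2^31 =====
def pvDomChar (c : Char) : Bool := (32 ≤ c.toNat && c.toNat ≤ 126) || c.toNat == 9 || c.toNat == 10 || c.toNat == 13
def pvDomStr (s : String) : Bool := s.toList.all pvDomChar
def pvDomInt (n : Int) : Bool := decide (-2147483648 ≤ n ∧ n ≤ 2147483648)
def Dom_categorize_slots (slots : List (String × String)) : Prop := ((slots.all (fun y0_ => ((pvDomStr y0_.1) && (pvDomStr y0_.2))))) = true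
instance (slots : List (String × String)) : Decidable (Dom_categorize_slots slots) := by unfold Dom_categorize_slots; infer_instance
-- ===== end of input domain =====

-- B replaces A's in-place mutation of a nested date->period->slot dict by a two-phase
-- decomposition (group parsed slots into per-date buckets, then lay out each bucket):
-- same cost, different structure ("alternative").

-- shared parsing helper: both Pythons contain the identical try/except parse of
-- "YYYY-MM-DD HH:MM - HH:MM"; none = any exception (ValueError on the unpack / int()).
def pvParseSlot (slot : String) : Option (String × Int) :=
  match PySem.Str.splitMax? slot " " 1 with
  | some [date, time_range] =>
      -- split(" - ")[0] / split(":")[0]: a nonempty-separator split is never empty, so [0] is headD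
      let start_time := ((PySem.Str.split? time_range " - ").getD []).headD ""
      (PySem.Int.ofStr? (((PySem.Str.split? start_time ":").getD []).headD "")).map
        (fun h => (date, h))
  | _ => none

-- ===== PORT A =====
-- A's fresh value for categorized[date]
def pvAInit : PySem.Dict String (PySem.Dict String String) :=
  PySem.Dict.mk [("morning", PySem.Dict.mk []), ("afternoon", PySem.Dict.mk [])]

-- A's loop body: categorized[date]["morning"/"afternoon"][slot] = reserved_by is an
-- in-place update of a present key, ported as Dict.modify with a default never used.
def pvAStep (cat : PySem.Dict String (PySem.Dict String (PySem.Dict String String)))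
    (p : String × String) : PySem.Dict String (PySem.Dict String (PySem.Dict String String)) :=
  match pvParseSlot p.1 with
  | none => cat
  | some (date, hour) =>
    let cat := if cat.contains date then cat else cat.insert date pvAInit
    if 9 ≤ hour ∧ hour < 13 then
      cat.modify date (PySem.Dict.mk [])
        (fun inner => inner.modify "morning" (PySem.Dict.mk []) (fun m => m.insert p.1 p.2))
    else if 15 ≤ hour ∧ hour < 18 then
      cat.modify date (PySem.Dict.mk [])
        (fun inner => inner.modify "afternoon" (PySem.Dict.mk []) (fun m => m.insert p.1 p.2))
    else cat

def categorize_slots (slots : List (String × String)) :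
    List (String × List (String × List (String × String))) :=
  ((slots.foldl pvAStep (PySem.Dict.mk [])).items).map
    (fun q => (q.1, q.2.items.map (fun r => (r.1, r.2.items))))

-- ===== PORT B =====
-- first pass: grouped.setdefault(date, []).append((slot, reserved_by, hour))
def pvBStep (g : PySem.Dict String (List (String × String × Int))) (p : String × String) :
    PySem.Dict String (List (String × String × Int)) :=
  match pvParseSlot p.1 with
  | none => g
  | some (date, hour) => g.modify date [] (fun es => es ++ [(p.1, p.2, hour)])

-- second pass, inner loop over one bucket: fill the (morning, afternoon) pair of dicts
def pvLayoutStep (md : PySem.Dict String String × PySem.Dict String String)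
    (e : String × String × Int) : PySem.Dict String String × PySem.Dict String String :=
  if 9 ≤ e.2.2 ∧ e.2.2 < 13 then (md.1.insert e.1 e.2.1, md.2)
  else if 15 ≤ e.2.2 ∧ e.2.2 < 18 then (md.1, md.2.insert e.1 e.2.1)
  else md

def categorize_slots_alt (slots : List (String × String)) :
    List (String × List (String × List (String × String))) :=
  ((slots.foldl pvBStep (PySem.Dict.mk [])).items).map
    (fun q =>
      let md := q.2.foldl pvLayoutStep (PySem.Dict.mk [], PySem.Dict.mk [])
      (q.1, [("morning", md.1.items), ("afternoon", md.2.items)]))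

-- ===== PRECONDITION & SPEC =====
def Spec_categorize_slots (slots : List (String × String)) (out : List (String × List (String × List (String × String)))) : Prop := out = categorize_slots_alt slots
instance (slots : List (String × String)) (out : List (String × List (String × List (String × String)))) : Decidable (Spec_categorize_slots slots out) := by unfold Spec_categorize_slots; infer_instance

-- ===== CLAIM (what is proved, stated in full; the proofs are below) =====
def Claim_equal_categorize_slots : Prop := ∀ (slots : List (String × String)), Dom_categorize_slots slots → Spec_categorize_slots slots (categorize_slots slots)

-- ===== LEMMAS AND PROOFS =====

-- A's inner-dict mutation for one parsed entry (slot, reserved_by, hour)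
def pvInnerStep (inner : PySem.Dict String (PySem.Dict String String))
    (e : String × String × Int) : PySem.Dict String (PySem.Dict String String) :=
  if 9 ≤ e.2.2 ∧ e.2.2 < 13 then
    inner.modify "morning" (PySem.Dict.mk []) (fun m => m.insert e.1 e.2.1)
  else if 15 ≤ e.2.2 ∧ e.2.2 < 18 then
    inner.modify "afternoon" (PySem.Dict.mk []) (fun m => m.insert e.1 e.2.1)
  else inner

def pvInnerOf (es : List (String × String × Int)) : PySem.Dict String (PySem.Dict String String) :=
  es.foldl pvInnerStep pvAInit

-- the simulation: B's grouped state determines A's categorized state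
def pvPhi (g : PySem.Dict String (List (String × String × Int))) :
    PySem.Dict String (PySem.Dict String (PySem.Dict String String)) :=
  PySem.Dict.mk (g.items.map (fun q => (q.1, pvInnerOf q.2)))

theorem pvPhi_keys (g : PySem.Dict String (List (String × String × Int))) :
    (pvPhi g).keys = g.keys := by
  simp [pvPhi, PySem.Dict.keys, List.map_map, Function.comp]

theorem pvPhi_contains (g : PySem.Dict String (List (String × String × Int))) (k : String) :
    (pvPhi g).contains k = g.contains k := by
  simp only [pvPhi, PySem.Dict.contains, List.any_map]
  rfl

theorem pvPhi_get? (g : PySem.Dict String (List (String × String × Int))) (k : String) :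
    (pvPhi g).get? k = (g.get? k).map pvInnerOf := by
  simp only [pvPhi, PySem.Dict.get?, List.find?_map, Option.map_map]
  rfl

theorem pvPhi_insert (g : PySem.Dict String (List (String × String × Int))) (k : String)
    (v : List (String × String × Int)) :
    (pvPhi g).insert k (pvInnerOf v) = pvPhi (g.insert k v) := by
  by_cases hc : g.contains k
  · have hc' : (pvPhi g).contains k = true := by rw [pvPhi_contains]; exact hc
    apply PySem.Dict.ext
    rw [PySem.Dict.items_insert_of_contains _ _ hc']
    simp only [pvPhi, PySem.Dict.items_insert_of_contains _ _ hc, List.map_map]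
    refine List.map_congr_left fun q hq => ?_
    by_cases h : q.1 == k <;> simp [Function.comp, h]
  · have hc' : (pvPhi g).contains k = false := by rw [pvPhi_contains]; simpa using hc
    apply PySem.Dict.ext
    rw [PySem.Dict.items_insert_of_not_contains _ _ hc']
    simp [pvPhi, PySem.Dict.items_insert_of_not_contains _ _ (by simpa using hc)]

theorem pv_insert_same {κ ν : Type} [BEq κ] [LawfulBEq κ] (d : PySem.Dict κ ν) (k : κ) (v : ν)
    (hnd : d.keys.Nodup) (h : d.get? k = some v) : d.insert k v = d := by
  have hc : d.contains k = true := by rw [PySem.Dict.contains_eq_isSome_get?, h]; rfl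
  apply PySem.Dict.ext
  rw [PySem.Dict.items_insert_of_contains _ _ hc]
  conv_rhs => rw [← List.map_id d.items]
  refine List.map_congr_left ?_
  rintro ⟨q1, q2⟩ hq
  by_cases hk : q1 == k
  · have hkk : q1 = k := by simpa using hk
    have := PySem.Dict.get?_of_mem_items d hq hnd
    rw [hkk, h] at this
    have hv : v = q2 := by injection this
    simp [hkk, hv]
  · simp [hk]

theorem pvStep_commute (g : PySem.Dict String (List (String × String × Int)))
    (p : String × String) (hnd : g.keys.Nodup) :
    pvAStep (pvPhi g) p = pvPhi (pvBStep g p) := by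
  simp only [pvAStep, pvBStep]
  cases hp : pvParseSlot p.1 with
  | none => rfl
  | some dh =>
    obtain ⟨date, hour⟩ := dh
    simp only [pvPhi_contains, PySem.Dict.modify]
    by_cases hc : g.contains date
    · have hes : ∃ es, g.get? date = some es := by
        rw [PySem.Dict.contains_eq_isSome_get?] at hc
        cases hg : g.get? date with
        | none => rw [hg] at hc; simp at hc
        | some es => exact ⟨es, rfl⟩
      obtain ⟨es, hes⟩ := hes
      have hgd : g.getD date [] = es := by simp [PySem.Dict.getD_eq_get?_getD, hes]
      have hPgd : (pvPhi g).getD date (PySem.Dict.mk []) = pvInnerOf es := by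
        simp [PySem.Dict.getD_eq_get?_getD, pvPhi_get?, hes]
      simp only [hc, if_true, hgd, hPgd]
      by_cases h1 : 9 ≤ hour ∧ hour < 13
      · rw [if_pos h1]
        have hF : (pvInnerOf es).insert "morning"
            (((pvInnerOf es).getD "morning" (PySem.Dict.mk [])).insert p.1 p.2)
            = pvInnerOf (es ++ [(p.1, p.2, hour)]) := by
          simp [pvInnerOf, List.foldl_append, pvInnerStep, h1, PySem.Dict.modify]
        rw [hF, pvPhi_insert]
      · by_cases h2 : 15 ≤ hour ∧ hour < 18
        · rw [if_neg h1, if_pos h2]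
          have hF : (pvInnerOf es).insert "afternoon"
              (((pvInnerOf es).getD "afternoon" (PySem.Dict.mk [])).insert p.1 p.2)
              = pvInnerOf (es ++ [(p.1, p.2, hour)]) := by
            simp [pvInnerOf, List.foldl_append, pvInnerStep, h1, h2, PySem.Dict.modify]
          rw [hF, pvPhi_insert]
        · rw [if_neg h1, if_neg h2]
          have hskip : pvInnerOf (es ++ [(p.1, p.2, hour)]) = pvInnerOf es := by
            simp [pvInnerOf, List.foldl_append, pvInnerStep, h1, h2]
          rw [← pvPhi_insert, hskip]
          refine (pv_insert_same (pvPhi g) date (pvInnerOf es) ?_ ?_).symm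
          · rw [pvPhi_keys]; exact hnd
          · rw [pvPhi_get?, hes]; rfl
    · have hes : g.get? date = none := by
        rw [PySem.Dict.contains_eq_isSome_get?] at hc
        cases hg : g.get? date with
        | none => rfl
        | some es => rw [hg] at hc; simp at hc
      have hgd : g.getD date [] = [] := by simp [PySem.Dict.getD_eq_get?_getD, hes]
      have hc' : g.contains date = false := by simpa using hc
      have hg2 : ((pvPhi g).insert date pvAInit).getD date (PySem.Dict.mk []) = pvAInit := by
        simp [PySem.Dict.getD_eq_get?_getD, PySem.Dict.get?_insert_self]
      simp only [hc', Bool.false_eq_true, if_false, hgd, hg2, List.nil_append]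
      by_cases h1 : 9 ≤ hour ∧ hour < 13
      · rw [if_pos h1]
        rw [PySem.Dict.insert_insert_self]
        have hF : pvAInit.insert "morning"
            ((pvAInit.getD "morning" (PySem.Dict.mk [])).insert p.1 p.2)
            = pvInnerOf [(p.1, p.2, hour)] := by
          simp [pvInnerOf, pvInnerStep, h1, pvAInit, PySem.Dict.modify]
        rw [hF, pvPhi_insert]
      · by_cases h2 : 15 ≤ hour ∧ hour < 18
        · rw [if_neg h1, if_pos h2]
          rw [PySem.Dict.insert_insert_self]
          have hF : pvAInit.insert "afternoon"
              ((pvAInit.getD "afternoon" (PySem.Dict.mk [])).insert p.1 p.2)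
              = pvInnerOf [(p.1, p.2, hour)] := by
            simp [pvInnerOf, pvInnerStep, h1, h2, pvAInit, PySem.Dict.modify]
          rw [hF, pvPhi_insert]
        · rw [if_neg h1, if_neg h2]
          have hF : pvAInit = pvInnerOf [(p.1, p.2, hour)] := by
            simp [pvInnerOf, pvInnerStep, h1, h2, pvAInit]
          rw [hF, pvPhi_insert]

theorem pvBStep_nodup (g : PySem.Dict String (List (String × String × Int)))
    (p : String × String) (hnd : g.keys.Nodup) : (pvBStep g p).keys.Nodup := by
  simp only [pvBStep]
  cases pvParseSlot p.1 with
  | none => exact hnd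
  | some dh =>
    simp only [PySem.Dict.modify]
    exact PySem.Dict.nodup_keys_insert _ _ _ hnd

theorem pvFold_commute (slots : List (String × String))
    (g : PySem.Dict String (List (String × String × Int))) (hnd : g.keys.Nodup) :
    slots.foldl pvAStep (pvPhi g) = pvPhi (slots.foldl pvBStep g) := by
  induction slots generalizing g with
  | nil => rfl
  | cons p t ih =>
    simp only [List.foldl_cons, pvStep_commute g p hnd]
    exact ih _ (pvBStep_nodup g p hnd)

theorem pvInner_layout (es : List (String × String × Int))
    (m a : PySem.Dict String String) :
    es.foldl pvInnerStep (PySem.Dict.mk [("morning", m), ("afternoon", a)]) =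
      PySem.Dict.mk [("morning", (es.foldl pvLayoutStep (m, a)).1),
                     ("afternoon", (es.foldl pvLayoutStep (m, a)).2)] := by
  induction es generalizing m a with
  | nil => rfl
  | cons e t ih =>
    simp only [List.foldl_cons]
    by_cases h1 : 9 ≤ e.2.2 ∧ e.2.2 < 13
    · have hs : pvInnerStep (PySem.Dict.mk [("morning", m), ("afternoon", a)]) e =
          PySem.Dict.mk [("morning", m.insert e.1 e.2.1), ("afternoon", a)] := by
        simp only [pvInnerStep, if_pos h1]; rfl
      have hl : pvLayoutStep (m, a) e = (m.insert e.1 e.2.1, a) := by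
        simp [pvLayoutStep, h1]
      rw [hs, hl, ih]
    · by_cases h2 : 15 ≤ e.2.2 ∧ e.2.2 < 18
      · have hs : pvInnerStep (PySem.Dict.mk [("morning", m), ("afternoon", a)]) e =
            PySem.Dict.mk [("morning", m), ("afternoon", a.insert e.1 e.2.1)] := by
          simp only [pvInnerStep, if_neg h1, if_pos h2]; rfl
        have hl : pvLayoutStep (m, a) e = (m, a.insert e.1 e.2.1) := by
          simp [pvLayoutStep, h1, h2]
        rw [hs, hl, ih]
      · have hs : pvInnerStep (PySem.Dict.mk [("morning", m), ("afternoon", a)]) e =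
            PySem.Dict.mk [("morning", m), ("afternoon", a)] := by
          simp [pvInnerStep, h1, h2]
        have hl : pvLayoutStep (m, a) e = (m, a) := by
          simp [pvLayoutStep, h1, h2]
        rw [hs, hl, ih]

-- ===== VERDICT (by name: the statement is the Claim_ definition above) =====
theorem categorize_slots_spec : Claim_equal_categorize_slots := by
  intro slots _
  unfold Spec_categorize_slots categorize_slots categorize_slots_alt
  have h0 : (PySem.Dict.mk [] : PySem.Dict String (PySem.Dict String (PySem.Dict String String))) =
      pvPhi (PySem.Dict.mk []) := rfl
  rw [h0, pvFold_commute slots (PySem.Dict.mk []) (by simp [PySem.Dict.keys])]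
  simp only [pvPhi, List.map_map]
  refine List.map_congr_left (fun q _ => ?_)
  have := pvInner_layout q.2 (PySem.Dict.mk []) (PySem.Dict.mk [])
  simp only [Function.comp, pvInnerOf, pvAInit] at *
  rw [this]
  rfl
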